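-- pv_equiv track=rewrite | github.com/kmj3785/CopAndRobberInBusan | CopAndRobber/algo1_bfs.py | permutations_3
-- ===== SOURCE A (Python) =====
-- def permutations_3(array, c, turn = 0, number_of_dest=[], cop_goal_array=[]):
--     if turn > c - 1:
--         yield cop_goal_array
--         return
--
--     if turn == 0:
--         number_of_dest = [0 for i in range(len(array))]
--         cop_goal_array = [0 for i in range(c)]
--
--     for dest in range(0, len(array)):
--
--         copy_number_of_dest = number_of_dest.copy()
--         copy_cop_goal_array = cop_goal_array.copy()
--
--         if copy_number_of_dest[dest] < c // len(array) + 1: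
--             copy_cop_goal_array[turn] = dest
--             copy_number_of_dest[dest] += 1
--             for next in permutations_3(array, c, turn+1, copy_number_of_dest, copy_cop_goal_array):
--                 yield next
-- ===== SOURCE B (Python) =====
-- def permutations_3(array, c, turn=0, number_of_dest=[], cop_goal_array=[]):
--     # explicit stack/worklist DFS instead of recursion; children pushed in
--     # reverse so pops come in ascending dest order, matching A's yield order
--     stack = [(turn, number_of_dest, cop_goal_array)]
--     while stack:
--         t, nd, goal = stack.pop()
--         if t > c - 1:
--             yield goal
--             continue
--         if t == 0:
--             nd = [0] * len(array)
--             goal = [0] * c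
--         for dest in reversed(range(len(array))):
--             if nd[dest] < c // len(array) + 1:
--                 g = list(goal)
--                 g[t] = dest
--                 n2 = list(nd)
--                 n2[dest] += 1
--                 stack.append((t + 1, n2, g))
-- ===== Notes on version B (the rewrite author's own statement) =====
-- stated objective: alternative
-- what changed: Replaces A's recursive generator with an explicit stack/worklist DFS loop that pushes child states in reverse destination order so that popping reproduces A's exact yield order.
-- outside the precondition, e.g. on permutations_3([5], 3, 1, [9], []): A returns [], B returns []; on permutations_3([0], 3, 1, [0], []): A raises IndexError, B raises IndexError
import Mathlib
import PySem

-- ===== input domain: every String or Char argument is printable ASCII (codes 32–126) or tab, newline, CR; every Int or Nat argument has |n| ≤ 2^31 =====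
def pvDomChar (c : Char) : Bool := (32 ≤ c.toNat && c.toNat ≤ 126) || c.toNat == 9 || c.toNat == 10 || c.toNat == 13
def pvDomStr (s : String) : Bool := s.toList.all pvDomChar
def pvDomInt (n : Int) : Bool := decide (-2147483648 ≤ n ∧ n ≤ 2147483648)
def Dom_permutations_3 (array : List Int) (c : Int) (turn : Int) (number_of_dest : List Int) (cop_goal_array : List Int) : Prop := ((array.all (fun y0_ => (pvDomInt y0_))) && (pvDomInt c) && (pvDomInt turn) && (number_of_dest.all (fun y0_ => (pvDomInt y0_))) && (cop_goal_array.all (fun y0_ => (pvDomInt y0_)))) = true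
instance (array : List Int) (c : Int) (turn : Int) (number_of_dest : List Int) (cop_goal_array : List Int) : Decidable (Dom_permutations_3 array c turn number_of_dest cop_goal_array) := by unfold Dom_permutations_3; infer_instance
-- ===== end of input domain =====

-- B replaces A's recursive generator with an explicit stack/worklist DFS (children pushed in
-- reverse so pop order reproduces A's yield order); equivalence is about the list of yielded values.


-- ===== PORT A =====
-- Literal port of A's recursion. The Nat fuel is exactly the termination measure (c - turn).toNat,
-- and 'fuel = 0' is precisely Python's leaf test 'turn > c - 1'; all other steps are A's, in order.
-- On inputs excluded by Pre_ Python raises IndexError at nd[dest] / goal[turn]; there the port's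
-- pyGet? returns none (branch skipped) resp. pySetD leaves the list unchanged.
def permutations_3_go (array : List Int) (c : Int) : Nat → Int → List Int → List Int → List (List Int)
  | 0, _, _, goal => [goal]
  | f + 1, turn, nd, goal =>
    (List.range array.length).foldl
      (fun acc (dest : Nat) =>
        acc ++
          match PySem.List.pyGet? (if turn = 0 then List.replicate array.length 0 else nd) (dest : Int) with
          | none => []
          | some v =>
            if v < PySem.Int.floordiv c (array.length : Int) + 1 then
              permutations_3_go array c f (turn + 1)
                ((if turn = 0 then List.replicate array.length 0 else nd).set dest (v + 1))
                (PySem.List.pySetD (if turn = 0 then List.replicate c.toNat 0 else goal) turn (dest : Int))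
            else []) []

def permutations_3 (array : List Int) (c : Int) (turn : Int) (number_of_dest : List Int) (cop_goal_array : List Int) : List (List Int) :=
  permutations_3_go array c (c - turn).toNat turn number_of_dest cop_goal_array

-- ===== PORT B =====
-- Source B's inner 'for dest in reversed(range(len(array)))' push loop (stack head = top of stack).
def pvPush (array : List Int) (c : Int) (t : Int) (nd goal : List Int)
    (stack : List (Int × List Int × List Int)) : List (Int × List Int × List Int) :=
  ((List.range array.length).reverse).foldl
    (fun st (dest : Nat) =>
      match PySem.List.pyGet? nd (dest : Int) with
      | none => st
      | some v =>
        if v < PySem.Int.floordiv c (array.length : Int) + 1 then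
          (t + 1, nd.set dest (v + 1), PySem.List.pySetD goal t (dest : Int)) :: st
        else st) stack

-- Source B's 'while stack' loop; the Nat fuel is only the termination bound (each iteration strictly
-- decreases the weight Σ (len(array)+1)^(c - t) of the stack, proved in pvPush_measure_lt below),
-- the loop body is Source B's, step for step.  'fuel = 0' with a non-empty stack is unreachable from
-- permutations_3_alt's initial fuel.
def permutations_3_runB (array : List Int) (c : Int) :
    Nat → List (Int × List Int × List Int) → List (List Int)
  | _, [] => []
  | 0, _ :: _ => []
  | f + 1, (t, nd, goal) :: rest =>
    if t > c - 1 then goal :: permutations_3_runB array c f rest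
    else
      permutations_3_runB array c f
        (pvPush array c t
          (if t = 0 then List.replicate array.length 0 else nd)
          (if t = 0 then List.replicate c.toNat 0 else goal) rest)

def permutations_3_alt (array : List Int) (c : Int) (turn : Int) (number_of_dest : List Int) (cop_goal_array : List Int) : List (List Int) :=
  permutations_3_runB array c ((array.length + 1) ^ ((c - turn).toNat))
    [(turn, number_of_dest, cop_goal_array)]

-- ===== PRECONDITION & SPEC =====
-- Pre_ excludes calls whose caller-supplied internal recursion state is inconsistent (state lists
-- shorter than the recursion indexes, or a negative turn reaching below -len(cop_goal_array)),
-- where A raises IndexError — except when every destination cap is already saturated, in which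
-- case both A and B return [].
def Pre_permutations_3 (array : List Int) (c : Int) (turn : Int) (number_of_dest : List Int) (cop_goal_array : List Int) : Prop :=
  turn > c - 1 ∨ turn = 0 ∨ array = [] ∨
    (array.length ≤ number_of_dest.length ∧
      (0 < turn → c ≤ (cop_goal_array.length : Int)) ∧
      (turn < 0 → -turn ≤ (cop_goal_array.length : Int)))
instance (array : List Int) (c : Int) (turn : Int) (number_of_dest : List Int) (cop_goal_array : List Int) : Decidable (Pre_permutations_3 array c turn number_of_dest cop_goal_array) := by unfold Pre_permutations_3; infer_instance
def pvWitness_permutations_3 : List Int × Int × Int × List Int × List Int := ([0], 1, 0, [], [])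

def Spec_permutations_3 (array : List Int) (c : Int) (turn : Int) (number_of_dest : List Int) (cop_goal_array : List Int) (out : List (List Int)) : Prop := out = permutations_3_alt array c turn number_of_dest cop_goal_array
instance (array : List Int) (c : Int) (turn : Int) (number_of_dest : List Int) (cop_goal_array : List Int) (out : List (List Int)) : Decidable (Spec_permutations_3 array c turn number_of_dest cop_goal_array out) := by unfold Spec_permutations_3; infer_instance

-- ===== CLAIM (what is proved, stated in full; the proofs are below) =====
def Claim_equal_permutations_3 : Prop := ∀ (array : List Int) (c : Int) (turn : Int) (number_of_dest : List Int) (cop_goal_array : List Int), Dom_permutations_3 array c turn number_of_dest cop_goal_array → Pre_permutations_3 array c turn number_of_dest cop_goal_array → Spec_permutations_3 array c turn number_of_dest cop_goal_array (permutations_3 array c turn number_of_dest cop_goal_array)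

-- ===== LEMMAS AND PROOFS =====
-- weight of a worklist: each state of remaining depth k counts (n+1)^k; it strictly decreases
-- at every iteration of the loop, so it bounds the number of iterations
def pvMeasure (n : Nat) (c : Int) (stack : List (Int × List Int × List Int)) : Nat :=
  (stack.map (fun s => (n + 1) ^ ((c - s.1).toNat))).sum

theorem pvPush_measure_aux (n : Nat) (c t : Int) (nd goal : List Int) :
    ∀ (dests : List Nat) (st : List (Int × List Int × List Int)),
      pvMeasure n c (dests.foldl
        (fun st (dest : Nat) =>
          match PySem.List.pyGet? nd (dest : Int) with
          | none => st
          | some v =>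
            if v < PySem.Int.floordiv c (n : Int) + 1 then
              (t + 1, nd.set dest (v + 1), PySem.List.pySetD goal t (dest : Int)) :: st
            else st) st)
        ≤ pvMeasure n c st + dests.length * (n + 1) ^ ((c - (t + 1)).toNat) := by
  intro dests
  induction dests with
  | nil => intro st; simp
  | cons d ds ih =>
    intro st
    simp only [List.foldl_cons, List.length_cons]
    refine le_trans (ih _) ?_
    have hstep : pvMeasure n c
        (match PySem.List.pyGet? nd (d : Int) with
         | none => st
         | some v =>
           if v < PySem.Int.floordiv c (n : Int) + 1 then
             (t + 1, nd.set d (v + 1), PySem.List.pySetD goal t (d : Int)) :: st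
           else st)
        ≤ pvMeasure n c st + (n + 1) ^ ((c - (t + 1)).toNat) := by
      cases PySem.List.pyGet? nd (d : Int) with
      | none => simp
      | some v =>
        by_cases hv : v < PySem.Int.floordiv c (n : Int) + 1
        · simp only [hv, if_true, pvMeasure, List.map_cons, List.sum_cons]
          omega
        · simp [hv]
    rw [Nat.succ_mul]
    omega

theorem pvPush_measure_lt (array : List Int) (c t : Int) (nd goal : List Int)
    (rest : List (Int × List Int × List Int)) (ht : ¬ t > c - 1) :
    pvMeasure array.length c (pvPush array c t nd goal rest)
      < (array.length + 1) ^ ((c - t).toNat) + pvMeasure array.length c rest := by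
  have h1 := pvPush_measure_aux array.length c t nd goal ((List.range array.length).reverse) rest
  have hk : (c - t).toNat = (c - (t + 1)).toNat + 1 := by omega
  have hpow : 0 < (array.length + 1) ^ ((c - (t + 1)).toNat) := Nat.pow_pos (by omega)
  have hlen : ((List.range array.length).reverse).length = array.length := by simp
  rw [hlen] at h1
  have h3 : array.length * (array.length + 1) ^ ((c - (t + 1)).toNat)
      < (array.length + 1) ^ ((c - t).toNat) := by
    rw [hk, pow_succ]
    have h := hpow
    nlinarith
  have hpp : pvMeasure array.length c (pvPush array c t nd goal rest)
      ≤ pvMeasure array.length c rest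
        + array.length * (array.length + 1) ^ ((c - (t + 1)).toNat) := by
    unfold pvPush
    exact h1
  omega

-- what A's recursion produces from one worklist state
def pvGen (array : List Int) (c : Int) (s : Int × List Int × List Int) : List (List Int) :=
  permutations_3_go array c (c - s.1).toNat s.1 s.2.1 s.2.2

-- the child state B pushes for one dest (none = cap refused / IndexError input)
def pvChild (array : List Int) (c t : Int) (nd goal : List Int) (dest : Nat) :
    Option (Int × List Int × List Int) :=
  match PySem.List.pyGet? nd (dest : Int) with
  | none => none
  | some v =>
    if v < PySem.Int.floordiv c (array.length : Int) + 1 then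
      some (t + 1, nd.set dest (v + 1), PySem.List.pySetD goal t (dest : Int))
    else none

theorem pvPush_eq_filterMap (array : List Int) (c t : Int) (nd goal : List Int)
    (st : List (Int × List Int × List Int)) :
    pvPush array c t nd goal st
      = (List.range array.length).filterMap (pvChild array c t nd goal) ++ st := by
  unfold pvPush
  rw [List.foldl_reverse]
  induction List.range array.length with
  | nil => simp
  | cons d ds ih =>
    simp only [List.foldr_cons, List.filterMap_cons, ih]
    cases h : PySem.List.pyGet? nd (d : Int) with
    | none => simp [pvChild, h]
    | some v =>
      by_cases hv : v < PySem.Int.floordiv c (array.length : Int) + 1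
      · simp [pvChild, h, hv]
      · simp [pvChild, h, hv]

theorem pvFlatMap_filterMap {α β γ : Type} (g : α → Option β) (h : β → List γ) (l : List α) :
    (l.filterMap g).flatMap h = l.flatMap (fun a => match g a with | some b => h b | none => []) := by
  induction l with
  | nil => rfl
  | cons x xs ih =>
    cases h : g x with
    | none => simp [h, ih]
    | some b => simp [h, ih]

theorem pvRunB_eq_flatMap (array : List Int) (c : Int) :
    ∀ (fuel : Nat) (stack : List (Int × List Int × List Int)),
      pvMeasure array.length c stack ≤ fuel →
      permutations_3_runB array c fuel stack = stack.flatMap (pvGen array c) := by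
  intro fuel
  induction fuel with
  | zero =>
    intro stack h
    match stack with
    | [] => rfl
    | (t, nd, goal) :: rest =>
      exfalso
      have hpow : 0 < (array.length + 1) ^ ((c - t).toNat) := Nat.pow_pos (by omega)
      simp only [pvMeasure, List.map_cons, List.sum_cons] at h
      omega
  | succ M ih =>
    intro stack hN
    match stack with
    | [] => rfl
    | (t, nd, goal) :: rest =>
      have hpow : 0 < (array.length + 1) ^ ((c - t).toNat) := Nat.pow_pos (by omega)
      have hcons : pvMeasure array.length c ((t, nd, goal) :: rest)
          = (array.length + 1) ^ ((c - t).toNat) + pvMeasure array.length c rest := by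
        simp [pvMeasure]
      by_cases ht : t > c - 1
      · -- leaf: both yield goal and continue with the rest
        rw [permutations_3_runB]
        simp only [ht, if_true]
        have hz : (c - t).toNat = 0 := by omega
        have hrest : permutations_3_runB array c M rest = rest.flatMap (pvGen array c) :=
          ih rest (by omega)
        simp [hrest, pvGen, hz, permutations_3_go]
      · -- interior: B pushes exactly the children A recurses into, in order
        rw [permutations_3_runB]
        simp only [ht, if_false]
        set nd' := if t = 0 then List.replicate array.length 0 else nd with hnd'
        set goal' := if t = 0 then List.replicate c.toNat 0 else goal with hgoal'
        have hstep := pvPush_measure_lt array c t nd' goal' rest ht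
        have hih := ih (pvPush array c t nd' goal' rest) (by omega)
        rw [hih, pvPush_eq_filterMap, List.flatMap_append,
            pvFlatMap_filterMap (pvChild array c t nd' goal') (pvGen array c)]
        have hk : (c - t).toNat = (c - (t + 1)).toNat + 1 := by omega
        have hgen : pvGen array c (t, nd, goal)
            = (List.range array.length).flatMap
                (fun dest => match pvChild array c t nd' goal' dest with
                  | some s => pvGen array c s
                  | none => []) := by
          show permutations_3_go array c ((c - t).toNat) t nd goal = _
          rw [hk, permutations_3_go,
              PySem.List.foldl_append_eq_flatMap, List.nil_append]
          apply List.flatMap_congr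
          intro dest _
          simp only [pvChild, ← hnd', ← hgoal']
          cases PySem.List.pyGet? nd' (dest : Int) with
          | none => rfl
          | some v =>
            by_cases hv : v < PySem.Int.floordiv c (array.length : Int) + 1
            · simp [hv, pvGen]
            · simp [hv]
        rw [List.flatMap_cons, hgen]
        congr 1
        apply List.flatMap_congr
        intro x _
        cases pvChild array c t nd' goal' x <;> rfl

-- ===== VERDICT (by name: the statement is the Claim_ definition above) =====
theorem permutations_3_spec : Claim_equal_permutations_3 := by
  intro array c turn number_of_dest cop_goal_array _ _
  unfold Spec_permutations_3 permutations_3_alt permutations_3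
  rw [pvRunB_eq_flatMap array c ((array.length + 1) ^ ((c - turn).toNat))
      [(turn, number_of_dest, cop_goal_array)] (by simp [pvMeasure])]
  simp [pvGen]
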